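-- pv_equiv track=rewrite | github.com/iccem/Algorithms_and_data_structures_practicum | Sprint 3/sprint_3_A.py | is_correct_bracket_sequence
-- ===== SOURCE A (Python) =====
-- def is_correct_bracket_sequence(result):
--     clear_result = []
--     stack = []
--     for i in result:
--         if i[0] == ')' or i[-1] == '(' or i.count('(') != i.count(')'):
--             pass
--         elif i.count('(') == i.count(')'):
--             for j in i:
--                 if j == '(':
--                     stack.append(j)
--                 if j == ')' and len(stack) > 0:
--                     stack.pop()
--             if len(stack) == 0:
--                 clear_result.append(i)
--             stack = []
--         else:
--             clear_result.append(i)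
--             stack = []
--     return clear_result
-- ===== SOURCE B (Python) =====
-- def is_correct_bracket_sequence(result):
--     def balanced(s):
--         b = ''.join(c for c in s if c in '()')
--         while '()' in b:
--             b = b.replace('()', '')
--         return b == ''
--     return [s for s in result if balanced(s)]
-- ===== Notes on version B (the rewrite author's own statement) =====
-- stated objective: simpler
-- what changed: B replaces A's per-string guard chain plus clamped stack pass with a plain filter that strips non-bracket characters and repeatedly deletes adjacent '()' pairs, keeping the string iff nothing remains.
import Mathlib
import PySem

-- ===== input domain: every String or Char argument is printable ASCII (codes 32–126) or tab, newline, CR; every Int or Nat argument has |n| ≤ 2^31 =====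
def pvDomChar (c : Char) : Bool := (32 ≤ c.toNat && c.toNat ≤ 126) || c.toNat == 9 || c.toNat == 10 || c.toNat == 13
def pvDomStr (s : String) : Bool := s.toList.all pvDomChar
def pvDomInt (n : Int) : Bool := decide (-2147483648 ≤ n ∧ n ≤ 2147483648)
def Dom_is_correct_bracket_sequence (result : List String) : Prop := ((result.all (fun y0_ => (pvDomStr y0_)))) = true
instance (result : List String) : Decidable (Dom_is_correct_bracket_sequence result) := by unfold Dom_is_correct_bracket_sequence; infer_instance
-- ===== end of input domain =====

-- B filters by repeated deletion of adjacent "()" pairs (after dropping non-bracket chars)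
-- instead of A's guard chain + clamped stack pass: simpler, not faster.
-- ===== PORT A =====
-- loop body of A's 'for i in result'; i.count('(') on a 1-char needle is exactly List.count on the code points
def pvAStep (st : List String × List Char) (i : String) : List String × List Char :=
  let clear_result := st.1
  let stack := st.2
  let l := i.toList
  match PySem.Str.pyGet? i 0, PySem.Str.pyGet? i (-1) with
  | some c0, some clast =>
    if c0 = ')' ∨ clast = '(' ∨ l.count '(' ≠ l.count ')' then
      (clear_result, stack)
    else if l.count '(' = l.count ')' then
      let stack2 := l.foldl (fun st j =>
        let st := if j = '(' then st ++ [j] else st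
        if j = ')' ∧ st.length > 0 then st.dropLast else st) stack
      if stack2.length = 0 then (clear_result ++ [i], ([] : List Char))
      else (clear_result, ([] : List Char))
    else (clear_result ++ [i], ([] : List Char))
  | _, _ => (clear_result, stack)   -- empty string: Python raises IndexError here; excluded by Pre_

def is_correct_bracket_sequence (result : List String) : List String :=
  (result.foldl pvAStep (([] : List String), ([] : List Char))).1

-- ===== PORT B =====
-- one left-to-right pass of b.replace('()', '') (non-overlapping, left to right)
def pvRemovePairs : List Char → List Char
  | '(' :: ')' :: rest => pvRemovePairs rest
  | c :: rest => c :: pvRemovePairs rest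
  | [] => []

-- '()' in b
def pvHasPair : List Char → Bool
  | '(' :: ')' :: _ => true
  | _ :: rest => pvHasPair rest
  | [] => false

-- the next four lemmas are needed by pvWhileReduce's termination argument
theorem pvRemovePairs_cons (c : Char) (rest : List Char)
    (h : ∀ r, c = '(' → rest = ')' :: r → False) :
    pvRemovePairs (c :: rest) = c :: pvRemovePairs rest := by
  rw [pvRemovePairs.eq_def]
  split
  · rename_i r heq
    injection heq with h1 h2
    exact (h r h1 h2).elim
  · rename_i c2 r2 hx heq
    injection heq with h1 h2
    subst h1; subst h2; rfl
  · simp_all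

theorem pvHasPair_cons (c : Char) (rest : List Char)
    (h : ∀ r, c = '(' → rest = ')' :: r → False) :
    pvHasPair (c :: rest) = pvHasPair rest := by
  rw [pvHasPair.eq_def]
  split
  · rename_i r heq
    injection heq with h1 h2
    exact (h r h1 h2).elim
  · rename_i c2 r2 hx heq
    injection heq with h1 h2
    subst h1; subst h2; rfl
  · simp_all

theorem pvRemovePairs_length_le (b : List Char) : (pvRemovePairs b).length ≤ b.length := by
  induction b using pvRemovePairs.induct with
  | case1 rest ih => simp [pvRemovePairs]; omega
  | case2 c rest h ih => rw [pvRemovePairs_cons c rest h]; simp; omega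
  | case3 => simp [pvRemovePairs]

theorem pvRemovePairs_length_lt (b : List Char) (h : pvHasPair b = true) :
    (pvRemovePairs b).length < b.length := by
  induction b using pvRemovePairs.induct with
  | case1 rest ih =>
    have := pvRemovePairs_length_le rest
    simp [pvRemovePairs]; omega
  | case2 c rest hne ih =>
    rw [pvRemovePairs_cons c rest hne]
    rw [pvHasPair_cons c rest hne] at h
    have := ih h
    simp; omega
  | case3 => simp [pvHasPair] at h

-- while '()' in b: b = b.replace('()', '')
def pvWhileReduce (b : List Char) : List Char :=
  if h : pvHasPair b then pvWhileReduce (pvRemovePairs b) else b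
termination_by b.length
decreasing_by exact pvRemovePairs_length_lt b h

def pvBalancedB (s : String) : Bool :=
  let b := s.toList.filter (fun c => c = '(' || c = ')')
  pvWhileReduce b == []

def is_correct_bracket_sequence_alt (result : List String) : List String :=
  result.filter pvBalancedB

-- ===== PRECONDITION & SPEC =====
-- Pre_ excludes only lists containing an empty string, on which A raises IndexError at i[0].
def Pre_is_correct_bracket_sequence (result : List String) : Prop :=
  ∀ s ∈ result, s ≠ ""
instance (result : List String) : Decidable (Pre_is_correct_bracket_sequence result) := by
  unfold Pre_is_correct_bracket_sequence; infer_instance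

def pvWitness_is_correct_bracket_sequence : List String := ["(a)", ")(", "x"]

def Spec_is_correct_bracket_sequence (result : List String) (out : List String) : Prop := out = is_correct_bracket_sequence_alt result
instance (result : List String) (out : List String) : Decidable (Spec_is_correct_bracket_sequence result out) := by unfold Spec_is_correct_bracket_sequence; infer_instance

-- ===== CLAIM (what is proved, stated in full; the proofs are below) =====
def Claim_equal_is_correct_bracket_sequence : Prop := ∀ (result : List String), Dom_is_correct_bracket_sequence result → Pre_is_correct_bracket_sequence result → Spec_is_correct_bracket_sequence result (is_correct_bracket_sequence result)

-- ===== LEMMAS AND PROOFS =====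

-- the common validity predicate both sides are reduced to:
-- scan with an open-bracket counter, fail on an unmatched ')', require 0 at the end
def pvChk : List Char → Nat → Bool
  | [], n => n == 0
  | c :: rest, n =>
    if c = '(' then pvChk rest (n+1)
    else if c = ')' then
      match n with
      | 0 => false
      | m + 1 => pvChk rest m
    else pvChk rest n

theorem pvChk_filter (l : List Char) (n : Nat) :
    pvChk (l.filter (fun c => c = '(' || c = ')')) n = pvChk l n := by
  induction l generalizing n with
  | nil => rfl
  | cons c rest ih =>
    by_cases h1 : c = '('
    · simp [pvChk, h1, ih]
    · by_cases h2 : c = ')'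
      · cases n <;> simp [pvChk, h1, h2, ih]
      · simp [pvChk, h1, h2, ih]

theorem pvChk_removePairs (b : List Char) (n : Nat) :
    pvChk (pvRemovePairs b) n = pvChk b n := by
  induction b using pvRemovePairs.induct generalizing n with
  | case1 rest ih => simp [pvRemovePairs, pvChk, ih]
  | case2 c rest h ih =>
    rw [pvRemovePairs_cons c rest h]
    by_cases h1 : c = '('
    · simp [pvChk, h1, ih]
    · by_cases h2 : c = ')'
      · cases n <;> simp [pvChk, h1, h2, ih]
      · simp [pvChk, h1, h2, ih]
  | case3 => rfl

theorem pvChk_whileReduce (b : List Char) (n : Nat) :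
    pvChk (pvWhileReduce b) n = pvChk b n := by
  induction b using pvWhileReduce.induct generalizing n with
  | case1 b hp ih =>
    rw [pvWhileReduce, dif_pos hp, ih, pvChk_removePairs]
  | case2 b hp =>
    rw [pvWhileReduce, dif_neg hp]

theorem pvHasPair_whileReduce (b : List Char) : pvHasPair (pvWhileReduce b) = false := by
  induction b using pvWhileReduce.induct with
  | case1 b hp ih =>
    rw [pvWhileReduce, dif_pos hp]; exact ih
  | case2 b hp =>
    rw [pvWhileReduce, dif_neg hp]; simpa using hp

theorem mem_removePairs (b : List Char) (c : Char) (h : c ∈ pvRemovePairs b) : c ∈ b := by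
  induction b using pvRemovePairs.induct with
  | case1 rest ih => simp [pvRemovePairs] at h; simp [ih h]
  | case2 c2 rest hne ih =>
    rw [pvRemovePairs_cons c2 rest hne] at h
    rcases List.mem_cons.1 h with h | h
    · simp [h]
    · simp [ih h]
  | case3 => simpa [pvRemovePairs] using h

theorem mem_whileReduce (b : List Char) (c : Char) (h : c ∈ pvWhileReduce b) : c ∈ b := by
  induction b using pvWhileReduce.induct with
  | case1 b hp ih =>
    rw [pvWhileReduce, dif_pos hp] at h
    exact mem_removePairs b c (ih h)
  | case2 b hp =>
    rwa [pvWhileReduce, dif_neg hp] at h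

theorem pvChk_all_open (b : List Char) (n : Nat)
    (h : ∀ c ∈ b, c = '(') (hne : b ≠ []) : pvChk b n = false := by
  induction b generalizing n with
  | nil => exact absurd rfl hne
  | cons c rest ih =>
    have hc : c = '(' := h c (by simp)
    subst hc
    cases rest with
    | nil => simp [pvChk]
    | cons d r =>
      simp only [pvChk, if_pos rfl]
      exact ih (n + 1) (fun c hc => h c (List.mem_cons_of_mem _ hc)) (by simp)

theorem pvOpenTail (b : List Char) (hp : pvHasPair ('(' :: b) = false)
    (hbr : ∀ c ∈ b, c = '(' ∨ c = ')') : ∀ c ∈ b, c = '(' := by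
  induction b with
  | nil => simp
  | cons c2 r ih =>
    have hc2 : c2 = '(' := by
      rcases hbr c2 (by simp) with h | h
      · exact h
      · subst h; simp [pvHasPair] at hp
    subst hc2
    have hp2 : pvHasPair ('(' :: r) = false := by
      rw [pvHasPair_cons '(' ('(' :: r) (by intro r' _ h2; simp at h2)] at hp
      exact hp
    intro c hc
    rcases List.mem_cons.1 hc with h | h
    · simp [h]
    · exact ih hp2 (fun c hc => hbr c (by simp [hc])) c h

theorem pvTerminal_empty (b : List Char) (hp : pvHasPair b = false)
    (hbr : ∀ c ∈ b, c = '(' ∨ c = ')') (hchk : pvChk b 0 = true) : b = [] := by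
  cases b with
  | nil => rfl
  | cons c rest =>
    rcases hbr c (by simp) with h | h
    · subst h
      have hall : ∀ x ∈ '(' :: rest, x = '(' := by
        intro x hx
        rcases List.mem_cons.1 hx with h | h
        · simp [h]
        · exact pvOpenTail rest hp (fun c hc => hbr c (by simp [hc])) x h
      rw [pvChk_all_open _ 0 hall (by simp)] at hchk
      exact absurd hchk (by simp)
    · subst h
      simp [pvChk] at hchk

theorem pvBalancedB_eq_chk (s : String) : pvBalancedB s = pvChk s.toList 0 := by
  unfold pvBalancedB
  set f := s.toList.filter (fun c => c = '(' || c = ')') with hf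
  have hchkf : pvChk f 0 = pvChk s.toList 0 := pvChk_filter s.toList 0
  cases hc : pvChk s.toList 0 with
  | true =>
    have hbr : ∀ c ∈ pvWhileReduce f, c = '(' ∨ c = ')' := by
      intro c hcm
      have := mem_whileReduce f c hcm
      rw [hf] at this
      have := List.of_mem_filter this
      simpa using this
    have : pvWhileReduce f = [] := by
      apply pvTerminal_empty _ (pvHasPair_whileReduce f) hbr
      rw [pvChk_whileReduce, hchkf, hc]
    simp [this]
  | false =>
    have : pvWhileReduce f ≠ [] := by
      intro h
      have := pvChk_whileReduce f 0
      rw [h, hchkf, hc] at this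
      simpa [pvChk] using this
    simpa using this

-- ===== A-side characterisation =====
-- stack length of A's inner pass (Nat subtraction clamps exactly like A's guarded pop)
def pvALen : List Char → Nat → Nat
  | [], n => n
  | c :: rest, n => pvALen rest (if c = '(' then n + 1 else if c = ')' then n - 1 else n)

theorem pvAFold_length (l : List Char) (st : List Char) :
    (l.foldl (fun st j =>
        let st := if j = '(' then st ++ [j] else st
        if j = ')' ∧ st.length > 0 then st.dropLast else st) st).length
      = pvALen l st.length := by
  induction l generalizing st with
  | nil => rfl
  | cons c rest ih =>
    simp only [List.foldl, pvALen]
    rw [ih]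
    congr 1
    by_cases h1 : c = '('
    · simp [h1]
    · by_cases h2 : c = ')'
      · by_cases h3 : st.length > 0 <;> simp [h1, h2, h3] <;> omega
      · simp [h1, h2]

theorem pvChk_aLen (l : List Char) (n : Nat) (h : pvChk l n = true) : pvALen l n = 0 := by
  induction l generalizing n with
  | nil => simpa [pvChk, pvALen] using h
  | cons c rest ih =>
    by_cases h1 : c = '('
    · simp [pvChk, h1] at h; simpa [pvALen, h1] using ih _ h
    · by_cases h2 : c = ')'
      · cases n with
        | zero => simp [pvChk, h1, h2] at h
        | succ m => simp [pvChk, h1, h2] at h; simpa [pvALen, h1, h2] using ih _ h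
      · simp [pvChk, h1, h2] at h; simpa [pvALen, h1, h2] using ih _ h

theorem pvALen_ge (l : List Char) (n : Nat) :
    (n : Int) + l.count '(' - l.count ')' ≤ (pvALen l n : Int) := by
  induction l generalizing n with
  | nil => simp [pvALen]
  | cons c rest ih =>
    by_cases h1 : c = '('
    · have := ih (n + 1)
      simp [pvALen, h1, List.count_cons]
      push_cast at this ⊢
      omega
    · by_cases h2 : c = ')'
      · have := ih (n - 1)
        have hcast : ((n - 1 : Nat) : Int) ≥ (n : Int) - 1 := by omega
        simp [pvALen, h1, h2, List.count_cons]
        push_cast at this ⊢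
        omega
      · have := ih n
        simp [pvALen, h1, h2, List.count_cons]
        push_cast at this ⊢
        omega

theorem pvCounts_of_chk (l : List Char) (n : Nat) (h : pvChk l n = true) :
    n + l.count '(' = l.count ')' := by
  induction l generalizing n with
  | nil => simp [pvChk] at h; simp [h]
  | cons c rest ih =>
    by_cases h1 : c = '('
    · simp [pvChk, h1] at h
      have := ih _ h
      simp [h1, List.count_cons]
      omega
    · by_cases h2 : c = ')'
      · cases n with
        | zero => simp [pvChk, h1, h2] at h
        | succ m =>
          simp [pvChk, h1, h2] at h
          have := ih _ h
          simp [h1, h2, List.count_cons]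
          omega
      · simp [pvChk, h1, h2] at h
        have := ih _ h
        simp [h1, h2, List.count_cons]
        omega

theorem pvChk_of_counts_aLen (l : List Char) (n : Nat)
    (hc : n + l.count '(' = l.count ')') (ha : pvALen l n = 0) : pvChk l n = true := by
  induction l generalizing n with
  | nil => simp [List.count_nil] at hc; simp [pvChk, hc]
  | cons c rest ih =>
    by_cases h1 : c = '('
    · simp [pvALen, h1] at ha
      simp [h1, List.count_cons] at hc
      simp [pvChk, h1]
      exact ih _ (by omega) ha
    · by_cases h2 : c = ')'
      · cases n with
        | zero =>
          exfalso
          simp [pvALen, h1, h2] at ha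
          simp [h1, h2, List.count_cons] at hc
          have := pvALen_ge rest 0
          rw [ha] at this
          push_cast at this
          omega
        | succ m =>
          simp [pvALen, h1, h2] at ha
          simp [h1, h2, List.count_cons] at hc
          simp [pvChk, h1, h2]
          exact ih _ (by omega) (by simpa using ha)
      · simp [pvALen, h1, h2] at ha
        simp [h1, h2, List.count_cons] at hc
        simp [pvChk, h1, h2]
        exact ih _ hc ha

theorem pvChk_append_open (l : List Char) (n : Nat) : pvChk (l ++ ['(']) n = false := by
  induction l generalizing n with
  | nil => simp [pvChk]
  | cons c rest ih =>
    by_cases h1 : c = '('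
    · simp [pvChk, h1, ih]
    · by_cases h2 : c = ')'
      · cases n <;> simp [pvChk, h1, h2, ih]
      · simp [pvChk, h1, h2, ih]

-- the per-element decision of A agrees with B's predicate on nonempty strings
theorem pvAStep_eq (acc : List String) (s : String) (hs : s ≠ "") :
    pvAStep (acc, ([] : List Char)) s
      = (if pvBalancedB s then acc ++ [s] else acc, ([] : List Char)) := by
  have hl : s.toList ≠ [] := fun h => hs (String.toList_inj.mp (by simp [h]))
  obtain ⟨c0, r, hlc⟩ : ∃ c0 r, s.toList = c0 :: r := by
    cases h : s.toList with
    | nil => exact absurd h hl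
    | cons a b => exact ⟨a, b, rfl⟩
  have hget0 : PySem.Str.pyGet? s 0 = some c0 := by
    simp [PySem.Str.pyGet?, hlc]
  obtain ⟨clast, hlast⟩ : ∃ cl, s.toList.getLast? = some cl := by
    cases h : s.toList.getLast? with
    | none => rw [List.getLast?_eq_none_iff] at h; exact absurd h hl
    | some cl => exact ⟨cl, rfl⟩
  have hgetm1 : PySem.Str.pyGet? s (-1) = some clast := by
    simp [PySem.Str.pyGet?, PySem.List.pyGet?_neg_one, hlast]
  rw [pvBalancedB_eq_chk]
  unfold pvAStep
  rw [hget0, hgetm1]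
  simp only []
  cases hc : pvChk s.toList 0 with
  | true =>
    have hc0 : c0 ≠ ')' := by
      intro h; subst h
      rw [hlc] at hc
      simp [pvChk] at hc
    have hclast : clast ≠ '(' := by
      intro h; subst h
      have hsplit : s.toList = s.toList.dropLast ++ ['('] := by
        conv_lhs => rw [← List.dropLast_append_getLast hl]
        rw [List.getLast?_eq_some_getLast hl] at hlast
        injection hlast with h2
        rw [h2]
      rw [hsplit, pvChk_append_open] at hc
      exact absurd hc (by simp)
    have hcount : s.toList.count '(' = s.toList.count ')' := by
      have := pvCounts_of_chk _ _ hc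
      omega
    have hlen0 : pvALen s.toList 0 = 0 := pvChk_aLen _ _ hc
    rw [if_neg (by simp [hc0, hclast, hcount])]
    rw [if_pos hcount]
    rw [if_pos (by rw [pvAFold_length]; simpa using hlen0)]
    simp
  | false =>
    by_cases hg : c0 = ')' ∨ clast = '(' ∨ s.toList.count '(' ≠ s.toList.count ')'
    · rw [if_pos hg]; simp
    · push_neg at hg
      obtain ⟨hg1, hg2, hg3⟩ := hg
      rw [if_neg (by simp [hg1, hg2, hg3])]
      rw [if_pos hg3]
      rw [if_neg (by
        rw [pvAFold_length]
        intro h0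
        have := pvChk_of_counts_aLen s.toList 0 (by omega) (by simpa using h0)
        rw [hc] at this
        exact absurd this (by simp))]
      simp

theorem pvFoldA (res : List String) (acc : List String)
    (h : ∀ s ∈ res, s ≠ "") :
    (res.foldl pvAStep (acc, ([] : List Char))).1 = acc ++ res.filter pvBalancedB := by
  induction res generalizing acc with
  | nil => simp
  | cons s rest ih =>
    simp only [List.foldl]
    rw [pvAStep_eq acc s (h s (by simp))]
    by_cases hb : pvBalancedB s
    · rw [if_pos hb, ih _ (fun t ht => h t (by simp [ht]))]
      simp [List.filter_cons, hb]
    · rw [if_neg hb, ih _ (fun t ht => h t (by simp [ht]))]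
      simp [List.filter_cons, hb]

-- ===== VERDICT (by name: the statement is the Claim_ definition above) =====
theorem is_correct_bracket_sequence_spec : Claim_equal_is_correct_bracket_sequence := by
  intro result _ hpre
  unfold Spec_is_correct_bracket_sequence is_correct_bracket_sequence is_correct_bracket_sequence_alt
  rw [pvFoldA result [] hpre]
  simp
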